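-- pv_equiv track=rewrite | github.com/dan-011/Python-Algorithms | company_scheduling.py | company_scheduling
-- ===== SOURCE A (Python) =====
-- def company_scheduling(supply, r, c):
--     sums = [0]
--     for i in range(len(supply)):
--         if i < 3:
--             sums.append(r*supply[i] + sums[i])
--         else:
--             A = r*supply[i] + sums[i]
--             B = c*4 + sums[i-3]
--             if A < B:
--                 sums.append(A)
--             else:
--                 sums.append(B)
--     return sums[-1]
-- ===== SOURCE B (Python) =====
-- def company_scheduling(supply, r, c):
--     # Cost = r*(total supply) minus the best total "savings": replacing the
--     # per-item cost r*x over a window of 4 consecutive items by the flat 4*c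
--     # charge saves r*(window sum) - 4*c; pick disjoint windows maximizing savings.
--     n = len(supply)
--     m = [0, 0, 0, 0]  # m[j] = max savings achievable on the first j items
--     for j in range(4, n + 1):
--         gain = r * sum(supply[j-4:j]) - 4 * c
--         m.append(max(m[j-1], m[j-4] + gain))
--     return r * sum(supply) - m[n]
-- ===== Notes on version B (the rewrite author's own statement) =====
-- stated objective: alternative
-- what changed: Instead of A's prefix min-cost DP over per-prefix costs, B computes the answer as r*(total supply) minus the maximum total savings from choosing disjoint 4-item windows (weighted interval selection over window sums via slices), a complementary max-savings formulation A never computes.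
import Mathlib
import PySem

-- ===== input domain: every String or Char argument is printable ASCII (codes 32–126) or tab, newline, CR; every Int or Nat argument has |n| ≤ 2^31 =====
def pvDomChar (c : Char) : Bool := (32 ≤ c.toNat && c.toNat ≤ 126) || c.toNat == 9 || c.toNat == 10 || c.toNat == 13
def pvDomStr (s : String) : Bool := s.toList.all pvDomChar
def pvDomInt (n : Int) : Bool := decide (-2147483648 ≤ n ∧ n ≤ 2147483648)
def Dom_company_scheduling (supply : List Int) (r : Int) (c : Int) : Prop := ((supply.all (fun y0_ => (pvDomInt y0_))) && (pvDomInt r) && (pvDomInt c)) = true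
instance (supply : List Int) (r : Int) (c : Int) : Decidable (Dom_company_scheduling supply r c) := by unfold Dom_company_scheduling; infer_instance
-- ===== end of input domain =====

-- B computes r*(total supply) minus the maximum savings from disjoint 4-item windows,
-- instead of A's prefix min-cost DP (objective: alternative).

-- ===== PORT A =====
-- literal port of A: sums list grown by append over i in range(len(supply)), answer sums[-1]
def company_scheduling (supply : List Int) (r : Int) (c : Int) : Int :=
  let sums := (List.range supply.length).foldl (fun sums i =>
    if i < 3 then
      sums ++ [r * supply.getD i 0 + sums.getD i 0]
    else
      let A := r * supply.getD i 0 + sums.getD i 0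
      let B := c * 4 + sums.getD (i - 3) 0
      if A < B then sums ++ [A] else sums ++ [B]) [0]
  sums.getLastD 0

-- ===== PORT B =====
-- literal port of B: m = [0,0,0,0] grown by append over j in range(4, n+1);
-- sum(supply[j-4:j]) is ported with PySem.List.slice (exact Python slice semantics).
def company_scheduling_alt (supply : List Int) (r : Int) (c : Int) : Int :=
  let n := supply.length
  let m := (List.range' 4 (n - 3)).foldl (fun (m : List Int) (j : Nat) =>
    let gain := r * (PySem.List.slice supply (some ((j : Int) - 4)) (some (j : Int))).sum - 4 * c
    m ++ [max (m.getD (j - 1) 0) (m.getD (j - 4) 0 + gain)]) [0, 0, 0, 0]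
  r * supply.sum - m.getD n 0

-- ===== PRECONDITION & SPEC =====
def Spec_company_scheduling (supply : List Int) (r : Int) (c : Int) (out : Int) : Prop := out = company_scheduling_alt supply r c
instance (supply : List Int) (r : Int) (c : Int) (out : Int) : Decidable (Spec_company_scheduling supply r c out) := by unfold Spec_company_scheduling; infer_instance

-- ===== CLAIM (what is proved, stated in full; the proofs are below) =====
def Claim_equal_company_scheduling : Prop := ∀ (supply : List Int) (r : Int) (c : Int), Dom_company_scheduling supply r c → Spec_company_scheduling supply r c (company_scheduling supply r c)

-- ===== LEMMAS AND PROOFS =====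

-- A's recurrence as a function of the prefix length
def acost (s : List Int) (r c : Int) : Nat → Int
  | 0 => 0
  | (j+1) =>
    if j < 3 then r * s.getD j 0 + acost s r c j
    else
      let A := r * s.getD j 0 + acost s r c j
      let B := c * 4 + acost s r c (j - 3)
      if A < B then A else B
termination_by j => j
decreasing_by all_goals omega

-- B's recurrence: maximum savings on the first j items
def msav (s : List Int) (r c : Int) : Nat → Int
  | 0 => 0
  | 1 => 0
  | 2 => 0
  | 3 => 0
  | (j+4) => max (msav s r c (j+3)) (msav s r c j + (r * ((s.drop j).take 4).sum - 4 * c))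

lemma psum_succ (s : List Int) (j : Nat) :
    (s.take (j+1)).sum = (s.take j).sum + s.getD j 0 := by
  cases h : s[j]? <;>
    simp [List.take_add_one, h, List.getD_eq_getElem?_getD]

lemma window (s : List Int) (j : Nat) :
    (s.take (j+4)).sum = (s.take j).sum + ((s.drop j).take 4).sum := by
  rw [List.take_add, List.sum_append]

lemma if_lt_eq_min (A B : Int) : (if A < B then A else B) = min A B := by
  split_ifs <;> omega

-- the complementary-formulation bridge: A's min cost = r·(prefix sum) − max savings
lemma bridge (s : List Int) (r c : Int) : ∀ j, acost s r c j = r * (s.take j).sum - msav s r c j := by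
  intro j
  induction j using Nat.strong_induction_on with
  | _ j ih =>
    rcases j with _ | (_ | (_ | (_ | j)))
    · simp [acost, msav]
    · simp [acost, msav, psum_succ]
    · simp [acost, msav, psum_succ]; ring
    · simp [acost, msav, psum_succ]; ring
    · -- j+4
      have h1 : acost s r c (j+4) =
          min (r * s.getD (j+3) 0 + acost s r c (j+3)) (c * 4 + acost s r c j) := by
        rw [show j+4 = (j+3)+1 from rfl, acost, if_neg (by omega)]
        simp only [show j + 3 - 3 = j from by omega]
        exact if_lt_eq_min _ _
      rw [h1, ih (j+3) (by omega), ih j (by omega), msav]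
      have h2 : r * (s.take (j+4)).sum = r * (s.take (j+3)).sum + r * s.getD (j+3) 0 := by
        rw [show j+4 = (j+3)+1 from rfl, psum_succ]; ring
      have h3 : r * (s.take (j+4)).sum = r * (s.take j).sum + r * ((s.drop j).take 4).sum := by
        rw [window]; ring
      generalize hg : r * s.getD (j+3) 0 = G at *
      generalize hw : r * ((s.drop j).take 4).sum = W at *
      generalize r * (s.take (j+4)).sum = T4 at *
      generalize r * (s.take (j+3)).sum = T3 at *
      generalize r * (s.take j).sum = T0 at *
      generalize msav s r c (j+3) = M3
      generalize msav s r c j = M0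
      omega

-- A's fold builds the list of acost values over all prefix lengths
lemma a_fold (s : List Int) (r c : Int) : ∀ m,
    (List.range m).foldl (fun sums i =>
      if i < 3 then
        sums ++ [r * s.getD i 0 + sums.getD i 0]
      else
        let A := r * s.getD i 0 + sums.getD i 0
        let B := c * 4 + sums.getD (i - 3) 0
        if A < B then sums ++ [A] else sums ++ [B]) [0]
    = (List.range (m + 1)).map (acost s r c) := by
  intro m
  induction m with
  | zero => simp [acost]
  | succ m ih =>
    rw [List.range_succ, List.foldl_append, ih]
    simp only [List.foldl_cons, List.foldl_nil]
    have hget : ((List.range (m + 1)).map (acost s r c)).getD m 0 = acost s r c m :=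
      PySem.List.getD_map_range _ _ _ _ (by omega)
    have hrhs : (List.range (m + 1 + 1)).map (acost s r c)
        = (List.range (m + 1)).map (acost s r c) ++ [acost s r c (m+1)] := by
      rw [List.range_succ, List.map_append]; simp
    rw [hrhs, hget]
    by_cases h3 : m < 3
    · rw [if_pos h3]
      have : acost s r c (m+1) = r * s.getD m 0 + acost s r c m := by
        rw [acost, if_pos h3]
      rw [this]
    · rw [if_neg h3]
      have hget3 : ((List.range (m + 1)).map (acost s r c)).getD (m - 3) 0
          = acost s r c (m - 3) :=
        PySem.List.getD_map_range _ _ _ _ (by omega)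
      have : acost s r c (m+1) =
          if r * s.getD m 0 + acost s r c m < c * 4 + acost s r c (m - 3)
          then r * s.getD m 0 + acost s r c m
          else c * 4 + acost s r c (m - 3) := by
        rw [acost, if_neg h3]
      rw [hget3, this]
      split_ifs <;> rfl

-- B's fold builds the list of msav values
lemma b_fold (s : List Int) (r c : Int) : ∀ k,
    (List.range' 4 k).foldl (fun (m : List Int) (j : Nat) =>
      let gain := r * (PySem.List.slice s (some ((j : Int) - 4)) (some (j : Int))).sum - 4 * c
      m ++ [max (m.getD (j - 1) 0) (m.getD (j - 4) 0 + gain)]) [0, 0, 0, 0]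
    = (List.range (4 + k)).map (msav s r c) := by
  intro k
  induction k with
  | zero =>
    show [0,0,0,0] = _
    rw [show (4:Nat) + 0 = 4 from rfl, show List.range 4 = [0,1,2,3] from by decide]
    simp [msav]
  | succ k ih =>
    rw [show List.range' 4 (k+1) = List.range' 4 k ++ [4 + k] from by
          rw [List.range'_concat]; simp,
        List.foldl_append, ih]
    simp only [List.foldl_cons, List.foldl_nil]
    have hslice : PySem.List.slice s (some (((4 + k : Nat) : Int) - 4)) (some ((4 + k : Nat) : Int))
        = (s.drop k).take 4 := by
      rw [show (((4 + k : Nat) : Int) - 4) = ((k : Nat) : Int) from by push_cast; ring,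
          PySem.List.slice_natCast]
      congr 1
      omega
    have hg1 : ((List.range (4 + k)).map (msav s r c)).getD (4 + k - 1) 0 = msav s r c (k+3) := by
      rw [show 4 + k - 1 = k + 3 from by omega]
      exact PySem.List.getD_map_range _ _ _ _ (by omega)
    have hg4 : ((List.range (4 + k)).map (msav s r c)).getD (4 + k - 4) 0 = msav s r c k := by
      rw [show 4 + k - 4 = k from by omega]
      exact PySem.List.getD_map_range _ _ _ _ (by omega)
    have hrhs : (List.range (4 + (k + 1))).map (msav s r c)
        = (List.range (4 + k)).map (msav s r c) ++ [msav s r c (k+4)] := by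
      rw [show 4 + (k + 1) = (4 + k) + 1 from by omega, List.range_succ, List.map_append]
      simp [show 4 + k = k + 4 from by omega]
    rw [hslice, hg1, hg4, hrhs, msav]

-- ===== VERDICT (by name: the statement is the Claim_ definition above) =====
theorem company_scheduling_spec : Claim_equal_company_scheduling := by
  intro s r c _
  unfold Spec_company_scheduling
  have hA : company_scheduling s r c = acost s r c s.length := by
    unfold company_scheduling
    rw [a_fold s r c s.length, List.range_succ, List.map_append]
    simp
  have hB : company_scheduling_alt s r c = r * s.sum - msav s r c s.length := by
    simp only [company_scheduling_alt]
    rw [b_fold s r c (s.length - 3)]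
    congr 1
    by_cases h : 3 ≤ s.length
    · rw [show 4 + (s.length - 3) = s.length + 1 from by omega]
      exact PySem.List.getD_map_range _ _ _ _ (by omega)
    · rw [show s.length - 3 = 0 from by omega]
      exact PySem.List.getD_map_range _ _ _ _ (by omega)
  rw [hA, hB, bridge, List.take_length]
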